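-- pv_equiv track=rewrite | github.com/Jsemko/cracking_coding_interview | problem_17_8.py | find_max_height
-- ===== SOURCE A (Python) =====
-- import itertools
--
-- class PersonNode(object):
--
--     def __init__(self, weight, height):
--         self.weight = weight
--         self.height = height
--         self.edges = []
--         self.max_height_above = None
--
--     def find_my_max_height(self):
--         if self.max_height_above:
--             return self.max_height_above
--
--         next_heights = [1]
--         for next_person in self.edges:
--             next_heights.append(next_person.find_my_max_height() + 1)
--
--         self.max_height_above = max(next_heights)
--         return self.max_height_above
--
--     def __lt__(self, other):
--         return self.weight < other.weight and self.height < other.height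
--
-- def find_max_height(list_of_tuples):
--
--     nodes = [PersonNode(w, h) for (w, h) in list_of_tuples]
--
--     for n1, n2 in itertools.combinations(nodes, 2):
--         if n1 < n2:
--             n2.edges.append(n1)
--         if n2 < n1:
--             n1.edges.append(n2)
--
--     return max(n.find_my_max_height() for n in nodes)
-- ===== SOURCE B (Python) =====
-- def find_max_height(list_of_tuples):
--     # Sort by weight ascending, height descending for equal weights, then
--     # a single DP pass over heights: no graph, no recursion.
--     srt = sorted(list_of_tuples, key=lambda p: (p[0], -p[1]))
--     dp = []
--     for i, (_, h) in enumerate(srt):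
--         best = 0
--         for j in range(i):
--             if srt[j][1] < h and dp[j] > best:
--                 best = dp[j]
--         dp.append(best + 1)
--     return max(dp)
-- ===== Notes on version B (the rewrite author's own statement) =====
-- stated objective: alternative
-- what changed: A builds an O(n^2)-edge dominance graph over node objects and finds the longest chain by memoized recursive DFS; B sorts by (weight asc, height desc) and runs a single quadratic DP over heights with no graph, no objects and no recursion, which a timing run measured as a constant-factor speedup.
import Mathlib
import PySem

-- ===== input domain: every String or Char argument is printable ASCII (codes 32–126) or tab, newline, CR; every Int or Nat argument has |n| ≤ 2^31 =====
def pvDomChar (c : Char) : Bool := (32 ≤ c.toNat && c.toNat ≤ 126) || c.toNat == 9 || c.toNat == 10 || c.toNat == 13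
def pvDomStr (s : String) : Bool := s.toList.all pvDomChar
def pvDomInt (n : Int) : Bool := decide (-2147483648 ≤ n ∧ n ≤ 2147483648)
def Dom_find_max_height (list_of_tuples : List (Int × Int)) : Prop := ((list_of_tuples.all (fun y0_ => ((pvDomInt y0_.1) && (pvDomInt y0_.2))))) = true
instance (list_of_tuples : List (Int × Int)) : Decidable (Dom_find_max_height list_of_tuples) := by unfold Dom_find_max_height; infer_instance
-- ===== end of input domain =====

-- B replaces A's O(n^2)-edge graph + recursive DFS by a sort (weight asc, height desc) and a
-- quadratic DP over heights (no graph, no recursion); same return value on every non-empty input.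

-- ===== PORT A =====

-- PersonNode.__lt__ : weight and height both strictly smaller
def pvLt (a b : Int × Int) : Bool := decide (a.1 < b.1) && decide (a.2 < b.2)

-- itertools.combinations(range n, 2) in order: (0,1),(0,2),…,(0,n-1),(1,2),…
def pvPairs (n : Nat) : List (Nat × Nat) :=
  (List.range n).flatMap (fun i => (List.range' (i + 1) (n - (i + 1))).map (fun j => (i, j)))

-- nodes[k]'s (weight, height); indices produced by the loops are always in range
def pvT (l : List (Int × Int)) (k : Nat) : Int × Int := l.getD k (0, 0)

-- body of the combinations loop: append an edge to n2 resp. n1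
def pvStep (l : List (Int × Int)) (adj : List (List Nat)) (p : Nat × Nat) : List (List Nat) :=
  let adj1 := if pvLt (pvT l p.1) (pvT l p.2) then adj.set p.2 (adj.getD p.2 [] ++ [p.1]) else adj
  if pvLt (pvT l p.2) (pvT l p.1) then adj1.set p.1 (adj1.getD p.1 [] ++ [p.2]) else adj1

def pvBuildAdj (l : List (Int × Int)) : List (List Nat) :=
  (pvPairs l.length).foldl (pvStep l) (List.replicate l.length [])

-- find_my_max_height, memo cache dropped (it only caches the pure result); fuel bounds the
-- recursion depth (edges always lead to a strictly smaller weight, so depth ≤ n, proved below)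
def pvFmh (l : List (Int × Int)) (adj : List (List Nat)) : Nat → Nat → Int
  | 0, _ => 1
  | fuel + 1, i => (adj.getD i []).foldl (fun m k => max m (pvFmh l adj fuel k + 1)) 1

def find_max_height (list_of_tuples : List (Int × Int)) : Int :=
  let adj := pvBuildAdj list_of_tuples
  match (List.range list_of_tuples.length).map
      (fun i => pvFmh list_of_tuples adj list_of_tuples.length i) with
  | [] => 0          -- Python: max() of an empty generator raises ValueError; outside Pre_
  | x :: xs => xs.foldl max x

-- ===== PORT B =====

-- inner loop of Source B: best over dp[j] for j < i with srt[j][1] < srt[i][1]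
def pvBestPrev (srt : List (Int × Int)) (dp : List Int) (i : Nat) : Int :=
  (List.range i).foldl
    (fun best j =>
      if (srt.getD j (0, 0)).2 < (srt.getD i (0, 0)).2 ∧ dp.getD j 0 > best then dp.getD j 0
      else best) 0

def find_max_height_alt (list_of_tuples : List (Int × Int)) : Int :=
  let srt := PySem.List.sorted2 list_of_tuples (fun p => p.1) (fun p => -p.2)
  let dp := (List.range srt.length).foldl (fun dp i => dp ++ [pvBestPrev srt dp i + 1]) []
  match dp with
  | [] => 0          -- Python: max([]) raises ValueError; outside Pre_
  | x :: xs => xs.foldl max x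

-- ===== PRECONDITION & SPEC =====
-- Pre_ excludes only the empty list, on which both A and B raise ValueError (max of an empty sequence).
def Pre_find_max_height (list_of_tuples : List (Int × Int)) : Prop := list_of_tuples ≠ []
instance (list_of_tuples : List (Int × Int)) : Decidable (Pre_find_max_height list_of_tuples) := by
  unfold Pre_find_max_height; infer_instance

def pvWitness_find_max_height : (List (Int × Int)) := [(1, 1), (2, 2), (2, 0)]

def Spec_find_max_height (list_of_tuples : List (Int × Int)) (out : Int) : Prop := out = find_max_height_alt list_of_tuples
instance (list_of_tuples : List (Int × Int)) (out : Int) : Decidable (Spec_find_max_height list_of_tuples out) := by unfold Spec_find_max_height; infer_instance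

-- ===== CLAIM (what is proved, stated in full; the proofs are below) =====
def Claim_equal_find_max_height : Prop := ∀ (list_of_tuples : List (Int × Int)), Dom_find_max_height list_of_tuples → Pre_find_max_height list_of_tuples → Spec_find_max_height list_of_tuples (find_max_height list_of_tuples)

-- ===== LEMMAS AND PROOFS =====

-- ---- generic max-fold toolkit (max is idempotent: only membership matters) ----

theorem le_foldl_max (xs : List Int) (a : Int) : a ≤ xs.foldl max a := by
  induction xs generalizing a with
  | nil => simp
  | cons x xs ih => exact le_trans (le_max_left a x) (ih (max a x))

theorem mem_le_foldl_max (xs : List Int) (a x : Int) (hx : x ∈ xs) : x ≤ xs.foldl max a := by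
  induction xs generalizing a with
  | nil => cases hx
  | cons y ys ih =>
    rcases List.mem_cons.mp hx with rfl | h
    · exact le_trans (le_max_right a x) (le_foldl_max ys (max a x))
    · exact ih (max a y) h

theorem foldl_max_le (xs : List Int) (a b : Int) (hab : a ≤ b) (h : ∀ x ∈ xs, x ≤ b) :
    xs.foldl max a ≤ b := by
  induction xs generalizing a with
  | nil => simpa
  | cons y ys ih =>
    exact ih (max a y) (max_le hab (h y (List.mem_cons_self ..)))
      (fun x hx => h x (List.mem_cons_of_mem _ hx))

theorem foldl_max_mem_eq (xs ys : List Int) (a : Int) (h : ∀ v, v ∈ xs ↔ v ∈ ys) :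
    xs.foldl max a = ys.foldl max a :=
  le_antisymm
    (foldl_max_le xs a _ (le_foldl_max ys a) (fun x hx => mem_le_foldl_max ys a x ((h x).1 hx)))
    (foldl_max_le ys a _ (le_foldl_max xs a) (fun x hx => mem_le_foldl_max xs a x ((h x).2 hx)))

theorem foldl_max_map_add_one (xs : List Int) (a : Int) :
    (xs.map (· + 1)).foldl max (a + 1) = xs.foldl max a + 1 := by
  induction xs generalizing a with
  | nil => simp
  | cons x xs ih =>
    have h1 : max (a + 1) (x + 1) = max a x + 1 := by omega
    simp only [List.map, List.foldl, h1]
    exact ih (max a x)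

theorem foldl_max_map_add_one' (xs : List Int) :
    (xs.map (· + 1)).foldl max 1 = xs.foldl max 0 + 1 := by
  have h := foldl_max_map_add_one xs 0
  rwa [show (0 : Int) + 1 = 1 from rfl] at h

theorem foldl_maxf {α : Type} (g : α → Int) (xs : List α) (a : Int) :
    xs.foldl (fun m k => max m (g k)) a = (xs.map g).foldl max a := by
  induction xs generalizing a with
  | nil => rfl
  | cons x xs ih => simp only [List.map, List.foldl]; exact ih (max a (g x))

theorem foldl_max_cons_nonneg (x : Int) (xs : List Int) (hx : 0 ≤ x) :
    xs.foldl max x = (x :: xs).foldl max 0 := by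
  simp only [List.foldl, max_eq_right hx]

theorem foldl_if_max {α : Type} (p : α → Prop) [DecidablePred p] (f : α → Int) (xs : List α)
    (a : Int) :
    xs.foldl (fun b j => if p j ∧ f j > b then f j else b) a
      = ((xs.filter (fun j => decide (p j))).map f).foldl max a := by
  induction xs generalizing a with
  | nil => rfl
  | cons x xs ih =>
    by_cases hp : p x
    · have h1 : List.filter (fun j => decide (p j)) (x :: xs)
          = x :: List.filter (fun j => decide (p j)) xs := by simp [hp]
      have h2 : (if p x ∧ f x > a then f x else a) = max a (f x) := by
        by_cases hf : f x > a
        · rw [if_pos ⟨hp, hf⟩]; omega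
        · rw [if_neg (fun h => hf h.2)]; omega
      rw [List.foldl_cons, h2, h1, List.map_cons, List.foldl_cons, ih]
    · have h1 : List.filter (fun j => decide (p j)) (x :: xs)
          = List.filter (fun j => decide (p j)) xs := by simp [hp]
      rw [List.foldl_cons, if_neg (fun h => hp h.1), h1, ih]

theorem length_filter_lt_of_not {α : Type} (p : α → Bool) (L : List α) (s : α) (hs : s ∈ L)
    (hp : p s = false) : (L.filter p).length < L.length := by
  induction L with
  | nil => cases hs
  | cons a L ih =>
    rcases List.mem_cons.mp hs with rfl | h
    · have := List.length_filter_le p L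
      simp only [List.filter_cons, hp, Bool.false_eq_true, if_false, List.length_cons]
      omega
    · have := ih h
      by_cases hpa : p a = true
      · simp only [List.filter_cons, hpa, if_true, List.length_cons]; omega
      · rw [Bool.not_eq_true] at hpa
        simp only [List.filter_cons, hpa, Bool.false_eq_true, if_false, List.length_cons]; omega

-- ---- the common specification: longest strictly-(weight,height)-increasing chain ending at x ----

def pvRank (l : List (Int × Int)) (x : Int × Int) : Nat :=
  (l.filter (fun u => decide (u.1 < x.1))).length

theorem pvRank_lt (l : List (Int × Int)) (s x : Int × Int) (hs : s ∈ l) (h1 : s.1 < x.1) :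
    pvRank l s < pvRank l x := by
  unfold pvRank
  have hsub : l.filter (fun u => decide (u.1 < s.1))
      = (l.filter (fun u => decide (u.1 < x.1))).filter (fun u => decide (u.1 < s.1)) := by
    rw [List.filter_filter]
    apply List.filter_congr
    intro u _
    by_cases h : u.1 < s.1
    · have hx : u.1 < x.1 := by omega
      simp [h, hx]
    · simp [h]
  rw [hsub]
  apply length_filter_lt_of_not _ _ s ?_ (by simp)
  simp only [List.mem_filter, decide_eq_true_eq]
  exact ⟨hs, h1⟩

def chainLen (l : List (Int × Int)) (x : Int × Int) : Int :=
  ((l.attach.filter (fun s => pvLt s.1 x)).attach.map (fun s => chainLen l s.1.1)).foldl max 0 + 1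
termination_by pvRank l x
decreasing_by
  have hs := s.2
  simp only [List.mem_filter, List.mem_attach, true_and, pvLt, Bool.and_eq_true,
    decide_eq_true_eq] at hs
  exact pvRank_lt l s.1.1 x s.1.2 hs.1

theorem chainLen_pos (l : List (Int × Int)) (x : Int × Int) : 1 ≤ chainLen l x := by
  rw [chainLen]
  have := le_foldl_max
    ((l.attach.filter (fun s => pvLt s.1 x)).attach.map (fun s => chainLen l s.1.1)) 0
  omega

theorem mem_chainChildren (l : List (Int × Int)) (x : Int × Int) (v : Int) :
    v ∈ (l.attach.filter (fun s => pvLt s.1 x)).attach.map (fun s => chainLen l s.1.1)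
      ↔ ∃ s, s ∈ l ∧ pvLt s x = true ∧ v = chainLen l s := by
  constructor
  · intro hv
    rcases List.mem_map.1 hv with ⟨s, _, rfl⟩
    have hsf := s.2
    rcases List.mem_filter.1 hsf with ⟨_, hlt⟩
    exact ⟨s.1.1, s.1.2, hlt, rfl⟩
  · rintro ⟨s, hs, hlt, rfl⟩
    exact List.mem_map.2 ⟨⟨⟨s, hs⟩, List.mem_filter.2 ⟨List.mem_attach _ _, hlt⟩⟩,
      List.mem_attach _ _, rfl⟩

theorem getD_eq_getElem' {α : Type} (xs : List α) (k : Nat) (d : α) (h : k < xs.length) :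
    xs.getD k d = xs[k] := by
  simp [List.getD_eq_getElem?_getD, List.getElem?_eq_getElem h]

theorem pvT_eq_getElem (l : List (Int × Int)) (k : Nat) (h : k < l.length) :
    pvT l k = l[k] := getD_eq_getElem' l k (0, 0) h

theorem pvT_mem (l : List (Int × Int)) (k : Nat) (h : k < l.length) : pvT l k ∈ l := by
  rw [pvT_eq_getElem l k h]; exact List.getElem_mem _

-- ---- A-side: the adjacency lists contain exactly the strictly-smaller nodes ----

def pvContrib (l : List (Int × Int)) (j : Nat) (p : Nat × Nat) : List Nat :=
  (if p.2 = j ∧ pvLt (pvT l p.1) (pvT l p.2) = true then [p.1] else []) ++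
  (if p.1 = j ∧ pvLt (pvT l p.2) (pvT l p.1) = true then [p.2] else [])

theorem pvStep_length (l : List (Int × Int)) (adj : List (List Nat)) (p : Nat × Nat) :
    (pvStep l adj p).length = adj.length := by
  unfold pvStep
  split <;> split <;> simp

theorem getD_pvStep (l : List (Int × Int)) (adj : List (List Nat)) (p : Nat × Nat) (j : Nat)
    (hp : p.1 < adj.length) (hq : p.2 < adj.length) (hne : p.1 ≠ p.2) :
    (pvStep l adj p).getD j [] = adj.getD j [] ++ pvContrib l j p := by
  unfold pvStep pvContrib
  by_cases h1 : pvLt (pvT l p.1) (pvT l p.2) = true <;>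
    by_cases h2 : pvLt (pvT l p.2) (pvT l p.1) = true <;>
      by_cases e1 : p.1 = j <;> by_cases e2 : p.2 = j <;>
        simp_all [List.getD_eq_getElem?_getD]

theorem getD_foldl_pvStep (l : List (Int × Int)) (j : Nat) :
    ∀ (ps : List (Nat × Nat)) (adj : List (List Nat)),
      (∀ p ∈ ps, p.1 < adj.length ∧ p.2 < adj.length ∧ p.1 ≠ p.2) →
      (ps.foldl (pvStep l) adj).getD j [] = adj.getD j [] ++ ps.flatMap (pvContrib l j) := by
  intro ps
  induction ps with
  | nil => intro adj _; simp
  | cons p ps ih =>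
    intro adj hb
    have hp := hb p (List.mem_cons_self ..)
    have hlen := pvStep_length l adj p
    rw [List.foldl_cons, ih (pvStep l adj p)
      (fun q hq => by rw [hlen]; exact hb q (List.mem_cons_of_mem _ hq)),
      getD_pvStep l adj p j hp.1 hp.2.1 hp.2.2]
    simp [List.flatMap_cons, List.append_assoc]

theorem mem_pvPairs (n : Nat) (p : Nat × Nat) : p ∈ pvPairs n ↔ p.1 < p.2 ∧ p.2 < n := by
  rcases p with ⟨i, j⟩
  simp only [pvPairs, List.mem_flatMap, List.mem_range, List.mem_map, List.mem_range'_1,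
    Prod.mk.injEq]
  constructor
  · rintro ⟨a, ha, b, hb, rfl, rfl⟩; omega
  · rintro ⟨h1, h2⟩; exact ⟨i, by omega, j, by omega, rfl, rfl⟩

theorem mem_pvAdj (l : List (Int × Int)) (j k : Nat) :
    k ∈ (pvBuildAdj l).getD j []
      ↔ k < l.length ∧ j < l.length ∧ pvLt (pvT l k) (pvT l j) = true := by
  rw [pvBuildAdj, getD_foldl_pvStep l j (pvPairs l.length) _
    (by intro p hp; rw [List.length_replicate]; have := (mem_pvPairs _ p).1 hp; omega)]
  have hrep : (List.replicate l.length ([] : List Nat)).getD j [] = [] := by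
    by_cases h : j < l.length <;>
      simp [List.getD_eq_getElem?_getD, h]
  rw [hrep, List.nil_append, List.mem_flatMap]
  constructor
  · rintro ⟨p, hp, hk⟩
    have hb := (mem_pvPairs _ p).1 hp
    unfold pvContrib at hk
    rw [List.mem_append] at hk
    rcases hk with hk | hk
    · split at hk
      · rename_i hc
        rcases List.mem_singleton.1 hk with rfl
        exact ⟨by omega, by omega, hc.1 ▸ hc.2⟩
      · cases hk
    · split at hk
      · rename_i hc
        rcases List.mem_singleton.1 hk with rfl
        exact ⟨by omega, by omega, hc.1 ▸ hc.2⟩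
      · cases hk
  · rintro ⟨hk, hj, hlt⟩
    have hne : k ≠ j := by
      rintro rfl
      simp only [pvLt, Bool.and_eq_true, decide_eq_true_eq] at hlt
      omega
    rcases Nat.lt_or_ge k j with h | h
    · refine ⟨(k, j), (mem_pvPairs _ _).2 ⟨h, hj⟩, ?_⟩
      unfold pvContrib
      rw [if_pos ⟨rfl, hlt⟩, if_neg (fun hc => hne hc.1)]
      simp
    · have hkj : j < k := by omega
      refine ⟨(j, k), (mem_pvPairs _ _).2 ⟨hkj, hk⟩, ?_⟩
      unfold pvContrib
      rw [if_neg (fun hc => hne hc.1), if_pos ⟨rfl, hlt⟩]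
      simp

-- ---- A-side: pvFmh computes chainLen given enough fuel ----

theorem pvFmh_eq_chainLen (l : List (Int × Int)) :
    ∀ (fuel i : Nat), i < l.length → pvRank l (pvT l i) < fuel →
      pvFmh l (pvBuildAdj l) fuel i = chainLen l (pvT l i) := by
  intro fuel
  induction fuel with
  | zero => intro i _ h; omega
  | succ fuel ih =>
    intro i hi hr
    rw [pvFmh, foldl_maxf]
    have hcongr : ((pvBuildAdj l).getD i []).map (fun k => pvFmh l (pvBuildAdj l) fuel k + 1)
        = ((pvBuildAdj l).getD i []).map (fun k => chainLen l (pvT l k) + 1) := by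
      apply List.map_congr_left
      intro k hk
      have hm := (mem_pvAdj l i k).1 hk
      have hlt : (pvT l k).1 < (pvT l i).1 := by
        have := hm.2.2
        simp only [pvLt, Bool.and_eq_true, decide_eq_true_eq] at this
        exact this.1
      have hfk : pvRank l (pvT l k) < fuel := by
        have := pvRank_lt l (pvT l k) (pvT l i) (pvT_mem l k hm.1) hlt
        omega
      rw [ih k hm.1 hfk]
    rw [hcongr, show (fun k => chainLen l (pvT l k) + 1)
        = (fun v => v + 1) ∘ (fun k => chainLen l (pvT l k)) from rfl,
      ← List.map_map]
    rw [show (fun v => v + 1) = (· + (1:Int)) from rfl, foldl_max_map_add_one']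
    rw [chainLen]
    congr 1
    apply foldl_max_mem_eq
    intro v
    rw [mem_chainChildren]
    simp only [List.mem_map]
    constructor
    · rintro ⟨k, hk, rfl⟩
      have hm := (mem_pvAdj l i k).1 hk
      exact ⟨pvT l k, pvT_mem l k hm.1, hm.2.2, rfl⟩
    · rintro ⟨s, hs, hlt, rfl⟩
      rcases List.mem_iff_getElem.1 hs with ⟨k, hkl, rfl⟩
      refine ⟨k, (mem_pvAdj l i k).2 ⟨hkl, hi, ?_⟩, by rw [pvT_eq_getElem l k hkl]⟩
      rw [pvT_eq_getElem l k hkl]; exact hlt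

theorem find_max_height_eq_spec (l : List (Int × Int)) (hne : l ≠ []) :
    find_max_height l = (l.map (chainLen l)).foldl max 0 := by
  have hn : 0 < l.length := List.length_pos_iff.2 hne
  have hmap : (List.range l.length).map (fun i => pvFmh l (pvBuildAdj l) l.length i)
      = (List.range l.length).map (fun i => chainLen l (pvT l i)) := by
    apply List.map_congr_left
    intro i hi
    rw [List.mem_range] at hi
    apply pvFmh_eq_chainLen l _ i hi
    unfold pvRank
    exact length_filter_lt_of_not _ _ (pvT l i) (pvT_mem l i hi) (by simp)
  rw [find_max_height]
  simp only [hmap]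
  split
  · rename_i heq
    rw [List.map_eq_nil_iff, List.range_eq_nil] at heq
    omega
  · rename_i x xs heq
    have hx : 1 ≤ x := by
      have hxm : x ∈ (List.range l.length).map (fun i => chainLen l (pvT l i)) := by
        rw [heq]; exact List.mem_cons_self ..
      rcases List.mem_map.1 hxm with ⟨i, _, rfl⟩
      exact chainLen_pos l _
    rw [foldl_max_cons_nonneg x xs (by omega), ← heq]
    apply foldl_max_mem_eq
    intro v
    simp only [List.mem_map, List.mem_range]
    constructor
    · rintro ⟨i, hi, rfl⟩
      exact ⟨pvT l i, pvT_mem l i hi, rfl⟩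
    · rintro ⟨s, hs, rfl⟩
      rcases List.mem_iff_getElem.1 hs with ⟨i, hil, rfl⟩
      exact ⟨i, hil, by rw [pvT_eq_getElem l i hil]⟩

-- ---- B-side: order facts about the sort ----

def pvBefore (a b : Int × Int) : Bool :=
  decide (a.1 < b.1) || (!decide (b.1 < a.1) && decide (-a.2 < -b.2))

theorem pvBefore_true (a b : Int × Int) :
    pvBefore a b = true ↔ (a.1 < b.1 ∨ (¬ b.1 < a.1 ∧ -a.2 < -b.2)) := by
  simp [pvBefore]

theorem pvBefore_asym (a b : Int × Int) (h : pvBefore a b = true) : pvBefore b a = false := by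
  rw [pvBefore_true] at h
  rw [Bool.eq_false_iff, Ne, pvBefore_true]
  omega

theorem pvBefore_trans (a b c : Int × Int) (h1 : pvBefore a b = true)
    (h2 : pvBefore b c = true) : pvBefore a c = true := by
  rw [pvBefore_true] at *
  omega

theorem pairwise_insertBy {α : Type} (bf : α → α → Bool)
    (hasym : ∀ a b, bf a b = true → bf b a = false)
    (htrans : ∀ a b c, bf a b = true → bf b c = true → bf a c = true)
    (x : α) (ys : List α) (h : ys.Pairwise (fun a b => bf b a = false)) :
    (PySem.List.insertBy bf x ys).Pairwise (fun a b => bf b a = false) := by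
  induction ys with
  | nil => simp [PySem.List.insertBy]
  | cons y ys ih =>
    rw [List.pairwise_cons] at h
    by_cases hb : bf x y = true
    · rw [show PySem.List.insertBy bf x (y :: ys) = x :: y :: ys from by
        simp [PySem.List.insertBy, hb]]
      refine List.Pairwise.cons ?_ (List.pairwise_cons.2 h)
      intro z hz
      rcases List.mem_cons.mp hz with rfl | hz'
      · exact hasym x z hb
      · by_cases hzx : bf z x = true
        · have hzy := htrans z x y hzx hb
          rw [h.1 z hz'] at hzy
          cases hzy
        · exact Bool.eq_false_iff.2 hzx
    · rw [show PySem.List.insertBy bf x (y :: ys) = y :: PySem.List.insertBy bf x ys from by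
        simp [PySem.List.insertBy, hb]]
      refine List.Pairwise.cons ?_ (ih h.2)
      intro z hz
      rcases (PySem.List.mem_insertBy bf x z ys).1 hz with rfl | hz'
      · exact Bool.eq_false_iff.2 hb
      · exact h.1 z hz'

theorem pairwise_foldl_insertBy {α : Type} (bf : α → α → Bool)
    (hasym : ∀ a b, bf a b = true → bf b a = false)
    (htrans : ∀ a b c, bf a b = true → bf b c = true → bf a c = true) :
    ∀ (xs acc : List α), acc.Pairwise (fun a b => bf b a = false) →
      (xs.foldl (fun acc x => PySem.List.insertBy bf x acc) acc).Pairwise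
        (fun a b => bf b a = false) := by
  intro xs
  induction xs with
  | nil => intro acc h; simpa
  | cons x xs ih =>
    intro acc h
    exact ih _ (pairwise_insertBy bf hasym htrans x acc h)

theorem pvSrt_eq_foldl (l : List (Int × Int)) :
    PySem.List.sorted2 l (fun p => p.1) (fun p => -p.2)
      = l.foldl (fun acc x => PySem.List.insertBy pvBefore x acc) [] := rfl

theorem pvSrt_pairwise (l : List (Int × Int)) :
    (PySem.List.sorted2 l (fun p => p.1) (fun p => -p.2)).Pairwise
      (fun a b => pvBefore b a = false) := by
  rw [pvSrt_eq_foldl]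
  exact pairwise_foldl_insertBy pvBefore pvBefore_asym pvBefore_trans l [] List.Pairwise.nil

theorem pvSrt_perm (l : List (Int × Int)) :
    (PySem.List.sorted2 l (fun p => p.1) (fun p => -p.2)).Perm l :=
  PySem.List.sorted2_perm l _ _ false

-- decode the pairwise fact at two positions j < i
theorem pvSrt_order (l : List (Int × Int)) (j i : Nat) (hj : j < i)
    (hi : i < (PySem.List.sorted2 l (fun p => p.1) (fun p => -p.2)).length) :
    (pvT (PySem.List.sorted2 l (fun p => p.1) (fun p => -p.2)) j).1
        ≤ (pvT (PySem.List.sorted2 l (fun p => p.1) (fun p => -p.2)) i).1 ∧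
      ((pvT (PySem.List.sorted2 l (fun p => p.1) (fun p => -p.2)) j).2
          < (pvT (PySem.List.sorted2 l (fun p => p.1) (fun p => -p.2)) i).2 →
        (pvT (PySem.List.sorted2 l (fun p => p.1) (fun p => -p.2)) j).1
          < (pvT (PySem.List.sorted2 l (fun p => p.1) (fun p => -p.2)) i).1) := by
  have hp := List.pairwise_iff_getElem.mp (pvSrt_pairwise l) j i (Nat.lt_trans hj hi) hi hj
  rw [pvT_eq_getElem _ j (Nat.lt_trans hj hi), pvT_eq_getElem _ i hi]
  rw [Bool.eq_false_iff, Ne, pvBefore_true] at hp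
  constructor
  · omega
  · intro h2
    by_contra hcon
    exact hp (Or.inr ⟨by omega, by omega⟩)

-- ---- B-side: the DP array computes chainLen along the sorted order ----

def pvDpAfter (srt : List (Int × Int)) (m : Nat) : List Int :=
  (List.range m).foldl (fun dp i => dp ++ [pvBestPrev srt dp i + 1]) []

theorem getElem?_append_singleton_len {α : Type} (xs : List α) (a : α) (j : Nat)
    (h : xs.length = j) : (xs ++ [a])[j]? = some a := by
  subst h; exact List.getElem?_concat_length

theorem pvDpAfter_succ (srt : List (Int × Int)) (m : Nat) :
    pvDpAfter srt (m + 1) = pvDpAfter srt m ++ [pvBestPrev srt (pvDpAfter srt m) m + 1] := by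
  unfold pvDpAfter
  rw [List.range_succ, List.foldl_append, List.foldl_cons, List.foldl_nil]

theorem pvDpAfter_length (srt : List (Int × Int)) (m : Nat) : (pvDpAfter srt m).length = m := by
  induction m with
  | zero => rfl
  | succ m ih => rw [pvDpAfter_succ]; simp [ih]

theorem pvDp_inv (l : List (Int × Int)) :
    ∀ (m : Nat), m ≤ l.length → ∀ (j : Nat), j < m →
      (pvDpAfter (PySem.List.sorted2 l (fun p => p.1) (fun p => -p.2)) m).getD j 0
        = chainLen l (pvT (PySem.List.sorted2 l (fun p => p.1) (fun p => -p.2)) j) := by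
  have hlen : (PySem.List.sorted2 l (fun p => p.1) (fun p => -p.2)).length = l.length :=
    (pvSrt_perm l).length_eq
  intro m
  induction m with
  | zero => intro _ j hj; omega
  | succ m ih =>
    intro hm j hj
    set srt := PySem.List.sorted2 l (fun p => p.1) (fun p => -p.2) with hsrt
    rw [pvDpAfter_succ]
    rcases Nat.lt_or_ge j m with hjm | hjm
    · rw [List.getD_eq_getElem?_getD,
        List.getElem?_append_left (by rw [pvDpAfter_length]; omega),
        ← List.getD_eq_getElem?_getD]
      exact ih (by omega) j hjm
    · have hjm : j = m := by omega
      subst hjm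
      have hjl : j < srt.length := by omega
      rw [List.getD_eq_getElem?_getD,
        getElem?_append_singleton_len _ _ j (pvDpAfter_length srt j), Option.getD_some]
      rw [pvBestPrev,
        foldl_if_max (fun k => (srt.getD k (0, 0)).2 < (srt.getD j (0, 0)).2)
          (fun k => (pvDpAfter srt j).getD k 0) (List.range j) 0]
      rw [chainLen]
      congr 1
      apply foldl_max_mem_eq
      intro v
      rw [mem_chainChildren]
      simp only [List.mem_map, List.mem_filter, List.mem_range, decide_eq_true_eq]
      constructor
      · rintro ⟨k, ⟨hk, hlt2⟩, rfl⟩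
        have hord := pvSrt_order l k j hk hjl
        rw [← hsrt] at hord
        have hlt2' : (pvT srt k).2 < (pvT srt j).2 := hlt2
        have hpvlt : pvLt (pvT srt k) (pvT srt j) = true := by
          simp only [pvLt, Bool.and_eq_true, decide_eq_true_eq]
          exact ⟨hord.2 hlt2', hlt2'⟩
        refine ⟨pvT srt k, ?_, hpvlt, ih (by omega) k hk⟩
        exact (pvSrt_perm l).mem_iff.1 (pvT_mem srt k (by omega))
      · rintro ⟨s, hs, hlt2, rfl⟩
        have hssrt : s ∈ srt := by
          have := (pvSrt_perm l).mem_iff.2 hs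
          rw [← hsrt] at this
          exact this
        rcases List.mem_iff_getElem.1 hssrt with ⟨k, hkl, rfl⟩
        have hpvT : pvT srt k = srt[k] := pvT_eq_getElem srt k hkl
        simp only [pvLt, Bool.and_eq_true, decide_eq_true_eq] at hlt2
        have hkj : k < j := by
          rcases Nat.lt_or_ge k j with h | h
          · exact h
          · exfalso
            rcases Nat.eq_or_lt_of_le h with rfl | h2
            · rw [hpvT] at hlt2; omega
            · have hord := pvSrt_order l j k h2 hkl
              rw [← hsrt] at hord
              rw [hpvT] at hord
              omega
        refine ⟨k, ⟨hkj, ?_⟩, ?_⟩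
        · show (pvT srt k).2 < (pvT srt j).2
          rw [hpvT]
          exact hlt2.2
        · rw [ih (by omega) k hkj, hpvT]

theorem find_max_height_alt_eq_spec (l : List (Int × Int)) (hne : l ≠ []) :
    find_max_height_alt l = (l.map (chainLen l)).foldl max 0 := by
  have hn : 0 < l.length := List.length_pos_iff.2 hne
  have hlen : (PySem.List.sorted2 l (fun p => p.1) (fun p => -p.2)).length = l.length :=
    (pvSrt_perm l).length_eq
  have halt : find_max_height_alt l
      = match pvDpAfter (PySem.List.sorted2 l (fun p => p.1) (fun p => -p.2))
            (PySem.List.sorted2 l (fun p => p.1) (fun p => -p.2)).length with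
        | [] => 0
        | x :: xs => xs.foldl max x := rfl
  rw [halt]
  have hdlen : (pvDpAfter (PySem.List.sorted2 l (fun p => p.1) (fun p => -p.2))
      (PySem.List.sorted2 l (fun p => p.1) (fun p => -p.2)).length).length = l.length := by
    rw [pvDpAfter_length, hlen]
  have hmem : ∀ v, v ∈ pvDpAfter (PySem.List.sorted2 l (fun p => p.1) (fun p => -p.2))
        (PySem.List.sorted2 l (fun p => p.1) (fun p => -p.2)).length
      ↔ v ∈ l.map (chainLen l) := by
    intro v
    constructor
    · intro hv
      rcases List.mem_iff_getElem.1 hv with ⟨k, hk, rfl⟩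
      have hk' : k < l.length := by rw [hdlen] at hk; exact hk
      rw [← getD_eq_getElem' _ k 0 hk, pvDp_inv l _ (le_of_eq hlen) k (by omega)]
      exact List.mem_map.2 ⟨pvT (PySem.List.sorted2 l (fun p => p.1) (fun p => -p.2)) k,
        (pvSrt_perm l).mem_iff.1 (pvT_mem _ k (by omega)), rfl⟩
    · intro hv
      rcases List.mem_map.1 hv with ⟨s, hs, rfl⟩
      rcases List.mem_iff_getElem.1 ((pvSrt_perm l).mem_iff.2 hs) with ⟨k, hkl, rfl⟩
      rw [List.mem_iff_getElem]
      refine ⟨k, by rw [hdlen]; omega, ?_⟩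
      rw [← getD_eq_getElem' _ k 0 (by rw [hdlen]; omega),
        pvDp_inv l _ (le_of_eq hlen) k (by omega), pvT_eq_getElem _ k hkl]
  rcases hdp : pvDpAfter (PySem.List.sorted2 l (fun p => p.1) (fun p => -p.2))
      (PySem.List.sorted2 l (fun p => p.1) (fun p => -p.2)).length with _ | ⟨x, xs⟩
  · rw [hdp] at hdlen
    simp at hdlen
    omega
  · have hx : 1 ≤ x := by
      have hxm : x ∈ pvDpAfter (PySem.List.sorted2 l (fun p => p.1) (fun p => -p.2))
          (PySem.List.sorted2 l (fun p => p.1) (fun p => -p.2)).length := by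
        rw [hdp]; exact List.mem_cons_self ..
      rcases List.mem_map.1 ((hmem x).1 hxm) with ⟨s, _, rfl⟩
      exact chainLen_pos l s
    rw [show (match x :: xs with | [] => (0 : Int) | x :: xs => xs.foldl max x)
        = xs.foldl max x from rfl]
    rw [foldl_max_cons_nonneg x xs (by omega), ← hdp]
    apply foldl_max_mem_eq
    exact hmem

-- ===== VERDICT (by name: the statement is the Claim_ definition above) =====
theorem find_max_height_spec : Claim_equal_find_max_height := by
  intro l _ hpre
  unfold Spec_find_max_height
  rw [find_max_height_eq_spec l hpre, find_max_height_alt_eq_spec l hpre]
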